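-- pv_equiv track=rewrite | github.com/borisovdenis-kb/annihilator-diplom | src/utility/math/math_utils.py | find_zhegalkin_polynomial_coefficients
-- ===== SOURCE A (Python) =====
-- def find_zhegalkin_polynomial_coefficients(f):
--     # нахождения коэффициентов многочлена Жег.
--     # методом Паскаля
--     # на вход принимает вектор значений булевой функции f
--     # ны выходе вектор коэффициентов многочлена Жег.
--     n = len(f)
--     coef = [[f[i]] for i in range(n)]
--
--     while n >= 1:
--         temp = [[] for i in range(n // 2)]
--
--         if len(coef) == 1:
--             return sum(coef, [])
--
--         for i in range(len(coef)):
--             if i % 2 == 0: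
--                 for j in range(len(coef[i])):
--                     temp[int(i / 2)].append(coef[i][j])
--             else:
--                 for j in range(len(coef[i])):
--                     temp[int(i / 2)].append(coef[i - 1][j] ^ coef[i][j])
--         n //= 2
--         coef = temp
-- ===== SOURCE B (Python) =====
-- def find_zhegalkin_polynomial_coefficients(f):
--     # top-down divide-and-conquer Moebius/ANF transform
--     n = len(f)
--     if n <= 1:
--         return list(f)
--     h = n // 2
--     u = find_zhegalkin_polynomial_coefficients(f[:h])
--     v = find_zhegalkin_polynomial_coefficients(f[h:])
--     return u + [x ^ y for x, y in zip(u, v)]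
-- ===== Notes on version B (the rewrite author's own statement) =====
-- stated objective: simpler
-- what changed: Replaces the iterative Pascal-triangle scheme over a list of lists with a short top-down divide-and-conquer ANF (Moebius) transform: split in halves, recurse, and return u + [x^y for x,y in zip(u,v)].
-- outside the precondition, e.g. on find_zhegalkin_polynomial_coefficients([]): A returns None, B returns []
import Mathlib
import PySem

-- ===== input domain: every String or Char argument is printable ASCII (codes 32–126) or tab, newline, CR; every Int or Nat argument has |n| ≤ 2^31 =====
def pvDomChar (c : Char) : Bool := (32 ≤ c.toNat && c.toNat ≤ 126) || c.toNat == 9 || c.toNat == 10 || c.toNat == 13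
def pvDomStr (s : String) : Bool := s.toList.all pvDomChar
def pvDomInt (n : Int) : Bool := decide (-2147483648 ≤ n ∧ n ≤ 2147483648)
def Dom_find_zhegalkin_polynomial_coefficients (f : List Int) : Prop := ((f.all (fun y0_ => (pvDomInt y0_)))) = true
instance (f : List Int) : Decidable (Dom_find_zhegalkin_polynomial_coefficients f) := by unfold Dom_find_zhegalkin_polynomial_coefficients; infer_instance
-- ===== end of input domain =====

-- B replaces A's iterative Pascal-triangle scheme over a list of lists by a top-down
-- divide-and-conquer ANF (Moebius) transform; objective: simpler (no speed claim).


-- ===== PORT A =====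
-- one round of A's while-body: temp[i/2] gets coef[i] (i even) resp. coef[i-1]^coef[i] (i odd),
-- i.e. adjacent pairs (a,b) become a ++ (a XOR b).  On an odd leftover block (or unequal block
-- lengths) Python raises IndexError; those inputs are outside Pre_ below.
def pascalPass : List (List Int) → List (List Int)
  | a :: b :: rest => (a ++ List.zipWith PySem.Int.bxor a b) :: pascalPass rest
  | _ => []

-- the while-loop: 'while n >= 1', returning sum(coef, []) once len(coef) == 1; falling out of
-- the loop (only reachable for f = [], where Python returns None) is modelled by [].
def pascalLoop (n : Nat) (coef : List (List Int)) : List Int :=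
  if 1 ≤ n then
    if coef.length = 1 then coef.flatten
    else pascalLoop (n / 2) (pascalPass coef)
  else []
termination_by n
decreasing_by omega

def find_zhegalkin_polynomial_coefficients (f : List Int) : List Int :=
  pascalLoop f.length (f.map (fun x => [x]))

-- ===== PORT B =====
-- top-down divide and conquer: split in halves, recurse, return u ++ (u XOR v)
def find_zhegalkin_polynomial_coefficients_alt (f : List Int) : List Int :=
  if f.length ≤ 1 then f
  else
    let half := f.length / 2
    let u := find_zhegalkin_polynomial_coefficients_alt (f.take half)
    let v := find_zhegalkin_polynomial_coefficients_alt (f.drop half)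
    u ++ List.zipWith PySem.Int.bxor u v
termination_by f.length
decreasing_by all_goals simp_all; omega

-- ===== PRECONDITION & SPEC =====
-- Pre_ excludes the empty list, on which A returns None (no List value), and lists whose length
-- is not a power of two, on which A raises IndexError (temp[int(i/2)] runs past the end).
def Pre_find_zhegalkin_polynomial_coefficients (f : List Int) : Prop :=
  ∃ k, k < f.length + 1 ∧ f.length = 2 ^ k
instance (f : List Int) : Decidable (Pre_find_zhegalkin_polynomial_coefficients f) := by
  unfold Pre_find_zhegalkin_polynomial_coefficients; infer_instance

def pvWitness_find_zhegalkin_polynomial_coefficients : List Int := [1, 0, 1, 1]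

def Spec_find_zhegalkin_polynomial_coefficients (f : List Int) (out : List Int) : Prop :=
  out = find_zhegalkin_polynomial_coefficients_alt f
instance (f : List Int) (out : List Int) : Decidable (Spec_find_zhegalkin_polynomial_coefficients f out) := by
  unfold Spec_find_zhegalkin_polynomial_coefficients; infer_instance

-- ===== CLAIM (what is proved, stated in full; the proofs are below) =====
def Claim_equal_find_zhegalkin_polynomial_coefficients : Prop :=
  ∀ (f : List Int), Dom_find_zhegalkin_polynomial_coefficients f →
    Pre_find_zhegalkin_polynomial_coefficients f →
    Spec_find_zhegalkin_polynomial_coefficients f (find_zhegalkin_polynomial_coefficients f)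

-- ===== LEMMAS AND PROOFS =====

theorem alt_singleton (x : Int) : find_zhegalkin_polynomial_coefficients_alt [x] = [x] := by
  rw [find_zhegalkin_polynomial_coefficients_alt]; simp

-- B's recursion step, for any two equal-length nonempty halves
theorem alt_append (u v : List Int) (hl : u.length = v.length) (h1 : 1 ≤ u.length) :
    find_zhegalkin_polynomial_coefficients_alt (u ++ v)
      = find_zhegalkin_polynomial_coefficients_alt u
        ++ List.zipWith PySem.Int.bxor (find_zhegalkin_polynomial_coefficients_alt u)
            (find_zhegalkin_polynomial_coefficients_alt v) := by
  rw [find_zhegalkin_polynomial_coefficients_alt]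
  have hlen : (u ++ v).length = u.length + u.length := by simp [hl.symm]
  have hhalf : (u ++ v).length / 2 = u.length := by omega
  have hc : ¬ (u ++ v).length ≤ 1 := by omega
  simp only [hc, if_false, hhalf]
  rw [List.take_left, List.drop_left]

def pairMerge : List (List Int) → List (List Int)
  | a :: b :: rest => (a ++ b) :: pairMerge rest
  | _ => []

theorem pascalPass_map (bs : List (List Int)) (m : Nat) (h1 : 1 ≤ m)
    (hb : ∀ b ∈ bs, b.length = m) :
    pascalPass (bs.map find_zhegalkin_polynomial_coefficients_alt)
      = (pairMerge bs).map find_zhegalkin_polynomial_coefficients_alt := by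
  induction bs using pairMerge.induct with
  | case1 a b rest ih =>
      have ha : a.length = m := hb a (by simp)
      have hbl : b.length = m := hb b (by simp)
      simp only [List.map, pascalPass, pairMerge]
      rw [← alt_append a b (by omega) (by omega), ih (fun x hx => hb x (by simp [hx]))]
  | case2 x hx =>
      match x, hx with
      | [], _ => simp [pascalPass, pairMerge]
      | [a], _ => simp [pascalPass, pairMerge]
      | a :: b :: r, hx => exact absurd rfl (hx a b r)

theorem pairMerge_length (bs : List (List Int)) (he : bs.length % 2 = 0) :
    (pairMerge bs).length = bs.length / 2 := by
  induction bs using pairMerge.induct with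
  | case1 a b rest ih =>
      simp only [pairMerge, List.length_cons]
      have : rest.length % 2 = 0 := by simp at he; omega
      rw [ih this]; omega
  | case2 x hx =>
      match x, hx, he with
      | [], _, _ => rfl
      | [a], _, he => simp at he
      | a :: b :: r, hx, _ => exact absurd rfl (hx a b r)

theorem pairMerge_blocks (bs : List (List Int)) (m : Nat)
    (hb : ∀ b ∈ bs, b.length = m) :
    ∀ b ∈ pairMerge bs, b.length = 2 * m := by
  induction bs using pairMerge.induct with
  | case1 a b rest ih =>
      intro c hc
      simp only [pairMerge, List.mem_cons] at hc
      rcases hc with rfl | hc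
      · have := hb a (by simp); have := hb b (by simp); simp; omega
      · exact ih (fun x hx => hb x (by simp [hx])) c hc
  | case2 x hx =>
      match x, hx with
      | [], _ => simp [pairMerge]
      | [a], _ => simp [pairMerge]
      | a :: b :: r, hx => exact absurd rfl (hx a b r)

theorem pairMerge_flatten (bs : List (List Int)) (he : bs.length % 2 = 0) :
    (pairMerge bs).flatten = bs.flatten := by
  induction bs using pairMerge.induct with
  | case1 a b rest ih =>
      have : rest.length % 2 = 0 := by simp at he; omega
      simp [pairMerge, ih this]
  | case2 x hx =>
      match x, hx, he with
      | [], _, _ => rfl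
      | [a], _, he => simp at he
      | a :: b :: r, hx, _ => exact absurd rfl (hx a b r)

theorem pascalLoop_eq_alt (j : Nat) :
    ∀ (bs : List (List Int)) (m : Nat), bs.length = 2 ^ j → 1 ≤ m →
      (∀ b ∈ bs, b.length = m) →
      pascalLoop (2 ^ j) (bs.map find_zhegalkin_polynomial_coefficients_alt)
        = find_zhegalkin_polynomial_coefficients_alt bs.flatten := by
  induction j with
  | zero =>
      intro bs m hlen h1 hb
      match bs, hlen with
      | [b], _ => rw [pascalLoop]; simp
  | succ j ih =>
      intro bs m hlen h1 hb
      rw [pascalLoop]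
      have h2 : (1:Nat) ≤ 2 ^ (j + 1) := Nat.one_le_two_pow
      have hml : (bs.map find_zhegalkin_polynomial_coefficients_alt).length = 2 ^ (j + 1) := by
        simp [hlen]
      have hne : ¬ (bs.map find_zhegalkin_polynomial_coefficients_alt).length = 1 := by
        rw [hml]; have : (2:Nat) ≤ 2 ^ (j + 1) := by
          calc (2:Nat) = 2 ^ 1 := rfl
          _ ≤ 2 ^ (j + 1) := Nat.pow_le_pow_right (by omega) (by omega)
        omega
      simp only [if_pos h2, hne, if_false]
      have hhalf : 2 ^ (j + 1) / 2 = 2 ^ j := by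
        rw [pow_succ]; omega
      have heven : bs.length % 2 = 0 := by
        rw [hlen, pow_succ]; omega
      rw [hhalf, pascalPass_map bs m h1 hb,
          ih (pairMerge bs) (2 * m)
            (by rw [pairMerge_length bs heven, hlen, pow_succ]; omega)
            (by omega) (pairMerge_blocks bs m hb),
          pairMerge_flatten bs heven]

-- ===== VERDICT (by name: the statement is the Claim_ definition above) =====
theorem find_zhegalkin_polynomial_coefficients_spec : Claim_equal_find_zhegalkin_polynomial_coefficients := by
  intro f _ hpre
  obtain ⟨k, _, hk⟩ := hpre
  show find_zhegalkin_polynomial_coefficients f = find_zhegalkin_polynomial_coefficients_alt f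
  unfold find_zhegalkin_polynomial_coefficients
  have hmap : f.map (fun x => [x])
      = (f.map (fun x => [x])).map find_zhegalkin_polynomial_coefficients_alt := by
    simp [alt_singleton]
  have hflat : ∀ (l : List Int), (l.map (fun x => [x])).flatten = l := by
    intro l
    induction l with
    | nil => simp
    | cons a t iht => simp [iht]
  rw [hk, hmap, pascalLoop_eq_alt k (f.map (fun x => [x])) 1 (by simp [hk]) (by omega)
      (by intro b hb; simp at hb; obtain ⟨x, _, rfl⟩ := hb; simp), hflat f]
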